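-- pv_equiv track=rewrite | github.com/baxthus/AdventOfCode | 2015/Day17/main.py | find_min_containers_and_combinations
-- ===== SOURCE A (Python) =====
-- from itertools import combinations
--
-- def find_min_containers_and_combinations(containers, target):
--     for r in range(1, len(containers) + 1):
--         count = 0
--         for combo in combinations(containers, r):
--             if sum(combo) == target:
--                 count += 1
--         if count > 0:
--             return r, count
--     return None, 0
-- ===== SOURCE B (Python) =====
-- def find_min_containers_and_combinations(containers, target):
--     n = len(containers)
--
--     def count(i, k, t):
--         # number of size-k subsets of containers[i:] summing to t
--         if k == 0:
--             return 1 if t == 0 else 0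
--         if n - i < k:
--             return 0
--         return count(i + 1, k, t) + count(i + 1, k - 1, t - containers[i])
--
--     for r in range(1, n + 1):
--         c = count(0, r, target)
--         if c > 0:
--             return r, c
--     return None, 0
-- ===== Notes on version B (the rewrite author's own statement) =====
-- stated objective: alternative
-- what changed: Replaces itertools.combinations enumeration (materialising every r-tuple and summing it) with a direct Pascal-style recursive counter count(i,k,t) that never builds a combination and prunes when fewer than k elements remain.
import Mathlib
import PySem

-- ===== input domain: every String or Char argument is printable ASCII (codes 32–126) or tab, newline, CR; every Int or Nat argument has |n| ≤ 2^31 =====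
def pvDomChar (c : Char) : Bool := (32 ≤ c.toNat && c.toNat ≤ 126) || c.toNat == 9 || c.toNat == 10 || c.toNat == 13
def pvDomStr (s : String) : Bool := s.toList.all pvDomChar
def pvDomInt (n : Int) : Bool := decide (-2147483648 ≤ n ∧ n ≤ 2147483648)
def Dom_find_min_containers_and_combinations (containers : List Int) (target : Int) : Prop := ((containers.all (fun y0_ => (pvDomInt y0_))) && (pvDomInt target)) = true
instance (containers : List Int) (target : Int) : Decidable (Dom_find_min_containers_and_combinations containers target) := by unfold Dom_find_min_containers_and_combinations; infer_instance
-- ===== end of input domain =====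

-- B replaces A's explicit enumeration of all r-combinations by a direct Pascal-style
-- counting recursion (never materialising a combination); objective: alternative.

-- ===== PORT A =====
-- model of itertools.combinations(xs, r): all r-element subsequences in Python's order
def pvCombos : List Int → Nat → List (List Int)
  | _, 0 => [[]]
  | [], _ + 1 => []
  | x :: xs, r + 1 => ((pvCombos xs r).map (fun c => x :: c)) ++ pvCombos xs (r + 1)

-- inner loop of A: count = 0; for combo in combinations(...): if sum(combo) == target: count += 1
def pvCountA (containers : List Int) (target : Int) (r : Nat) : Int :=
  (pvCombos containers r).foldl (fun count combo => if combo.sum = target then count + 1 else count) 0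

-- outer loop of A over r in range(1, len+1)
def pvGoA (containers : List Int) (target : Int) : List Int → Option Int × Int
  | [] => (none, 0)
  | r :: rs =>
    let count := pvCountA containers target r.toNat
    if count > 0 then (some r, count) else pvGoA containers target rs

def find_min_containers_and_combinations (containers : List Int) (target : Int) : Option Int × Int :=
  pvGoA containers target (PySem.List.pyRange 1 ((containers.length : Int) + 1) 1)

-- ===== PORT B =====
-- Source B's count(i, k, t), transliterated with containers[i:] as the list argument
def pvCountB : List Int → Nat → Int → Int
  | _, 0, t => if t = 0 then 1 else 0
  | [], _ + 1, _ => 0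
  | x :: rest, k + 1, t =>
    if rest.length + 1 < k + 1 then 0
    else pvCountB rest (k + 1) t + pvCountB rest k (t - x)

-- outer loop of Source B over r in range(1, n+1)
def pvGoB (containers : List Int) (target : Int) : List Int → Option Int × Int
  | [] => (none, 0)
  | r :: rs =>
    let c := pvCountB containers r.toNat target
    if c > 0 then (some r, c) else pvGoB containers target rs

def find_min_containers_and_combinations_alt (containers : List Int) (target : Int) : Option Int × Int :=
  pvGoB containers target (PySem.List.pyRange 1 ((containers.length : Int) + 1) 1)

-- ===== PRECONDITION & SPEC =====
def Spec_find_min_containers_and_combinations (containers : List Int) (target : Int) (out : Option Int × Int) : Prop := out = find_min_containers_and_combinations_alt containers target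
instance (containers : List Int) (target : Int) (out : Option Int × Int) : Decidable (Spec_find_min_containers_and_combinations containers target out) := by unfold Spec_find_min_containers_and_combinations; infer_instance

-- ===== CLAIM (what is proved, stated in full; the proofs are below) =====
def Claim_equal_find_min_containers_and_combinations : Prop := ∀ (containers : List Int) (target : Int), Dom_find_min_containers_and_combinations containers target → Spec_find_min_containers_and_combinations containers target (find_min_containers_and_combinations containers target)

-- ===== LEMMAS AND PROOFS =====

theorem pvFoldl_count (t : Int) (l : List (List Int)) (a : Int) :
    l.foldl (fun count combo => if combo.sum = t then count + 1 else count) a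
      = a + (l.countP (fun c => decide (c.sum = t)) : Int) := by
  induction l generalizing a with
  | nil => simp
  | cons c l ih =>
    simp only [List.foldl_cons, List.countP_cons, ih]
    by_cases h : c.sum = t <;> simp [h] <;> try ring

theorem pvCombos_big (xs : List Int) (r : Nat) (h : xs.length < r) : pvCombos xs r = [] := by
  induction xs generalizing r with
  | nil => cases r with
    | zero => omega
    | succ r => rfl
  | cons x xs ih =>
    cases r with
    | zero => omega
    | succ r =>
      simp only [List.length_cons] at h
      simp only [pvCombos, ih r (by omega), ih (r + 1) (by omega), List.map_nil, List.nil_append]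

theorem pvCountB_eq_countP (xs : List Int) (k : Nat) (t : Int) :
    pvCountB xs k t = ((pvCombos xs k).countP (fun c => decide (c.sum = t)) : Int) := by
  induction xs generalizing k t with
  | nil =>
    cases k with
    | zero =>
      simp only [pvCountB, pvCombos, List.countP_cons, List.countP_nil, List.sum_nil]
      rcases eq_or_ne t 0 with h | h <;> simp [h] <;> omega
    | succ k => simp [pvCountB, pvCombos]
  | cons x xs ih =>
    cases k with
    | zero =>
      simp only [pvCountB, pvCombos, List.countP_cons, List.countP_nil, List.sum_nil]
      rcases eq_or_ne t 0 with h | h <;> simp [h] <;> omega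
    | succ k =>
      by_cases h : xs.length + 1 < k + 1
      · rw [pvCombos_big (x :: xs) (k + 1) (by simpa using h)]
        simp [pvCountB, h]
      · simp only [pvCountB, if_neg h, pvCombos, List.countP_append, List.countP_map]
        rw [ih (k + 1) t, ih k (t - x)]
        have : (pvCombos xs k).countP ((fun c => decide (c.sum = t)) ∘ (fun c => x :: c))
            = (pvCombos xs k).countP (fun c => decide (c.sum = t - x)) := by
          apply List.countP_congr
          intro c _
          simp only [Function.comp, List.sum_cons, decide_eq_true_eq]
          omega
        rw [this]
        push_cast
        ring

theorem pvCount_eq (containers : List Int) (target : Int) (r : Nat) :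
    pvCountA containers target r = pvCountB containers r target := by
  rw [pvCountA, pvFoldl_count, pvCountB_eq_countP]
  ring

theorem pvGo_eq (containers : List Int) (target : Int) (rs : List Int) :
    pvGoA containers target rs = pvGoB containers target rs := by
  induction rs with
  | nil => rfl
  | cons r rs ih =>
    simp only [pvGoA, pvGoB, pvCount_eq, ih]

-- ===== VERDICT (by name: the statement is the Claim_ definition above) =====
theorem find_min_containers_and_combinations_spec : Claim_equal_find_min_containers_and_combinations := by
  intro containers target _
  unfold Spec_find_min_containers_and_combinations find_min_containers_and_combinations find_min_containers_and_combinations_alt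
  exact pvGo_eq containers target _
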